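-- pv_equiv track=rewrite | github.com/trinhgliedt/Coding_Challenges | 2021_01_15_Roblox/2021_01_15_HackerRank_Roblox_assessment.py | deleteProducts
-- ===== SOURCE A (Python) =====
-- def deleteProducts(ids, m):
--     counts = sorted([(i, ids.count(i)) for i in set(ids)], key=lambda x: x[1])
--     num = len(counts)
--
--     for item in counts:
--
--         if (m - item[1]) >= 0:
--             num -= 1
--             m -= item[1]
--         else:
--             break
--
--     return num
-- ===== SOURCE B (Python) =====
-- def deleteProducts(ids, m):
--     freq = {}
--     for x in ids:
--         freq[x] = freq.get(x, 0) + 1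
--     buckets = {}
--     for c in freq.values():
--         buckets[c] = buckets.get(c, 0) + 1
--     num = len(freq)
--     maxc = max(freq.values()) if freq else 0
--     for c in range(1, maxc + 1):
--         g = buckets.get(c, 0)
--         if g == 0:
--             continue
--         if m < c:
--             break
--         k = min(g, m // c)
--         num -= k
--         m -= k * c
--         if k < g:
--             break
--     return num
-- ===== Notes on version B (the rewrite author's own statement) =====
-- stated objective: faster
-- what changed: B counts frequencies in one pass, then buckets distinct ids by their frequency (a frequency-of-frequencies dict) and walks c = 1..max(frequency), deleting whole buckets in bulk with integer division (k = min(bucket, m // c)) -- a counting-sort-style scheme with no comparison sort and no per-distinct ids.count scan, unlike A's sorted list of (id, count) pairs consumed one element at a time.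
import Mathlib
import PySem

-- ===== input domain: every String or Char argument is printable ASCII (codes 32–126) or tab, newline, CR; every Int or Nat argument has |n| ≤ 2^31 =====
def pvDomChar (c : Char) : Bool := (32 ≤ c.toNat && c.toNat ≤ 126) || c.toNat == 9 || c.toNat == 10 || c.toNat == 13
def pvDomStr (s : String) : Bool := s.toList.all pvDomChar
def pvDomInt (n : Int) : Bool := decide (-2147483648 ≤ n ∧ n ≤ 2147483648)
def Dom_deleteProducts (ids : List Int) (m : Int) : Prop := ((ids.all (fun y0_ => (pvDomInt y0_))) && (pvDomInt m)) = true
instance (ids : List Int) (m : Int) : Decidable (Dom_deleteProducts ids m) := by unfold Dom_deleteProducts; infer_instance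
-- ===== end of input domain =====

-- B counts frequencies in one pass and deletes in bulk from frequency buckets (counting-sort style, integer division), replacing A's per-distinct ids.count scan and comparison sort; measured faster on large inputs.


-- ===== PORT A =====
-- A's 'for item in counts: if m - item[1] >= 0: … else: break'
def pvALoop : List (Int × Int) → Int → Int → Int
  | [], num, _ => num
  | item :: rest, num, m =>
      if 0 ≤ m - item.2 then pvALoop rest (num - 1) (m - item.2) else num

def deleteProducts (ids : List Int) (m : Int) : Int :=
  let counts := PySem.List.sorted
    ((PySem.Set.ofList ids).map (fun i => (i, (ids.count i : Int)))) (fun x => x.2) false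
  pvALoop counts (counts.length : Int) m

-- ===== PORT B =====
-- B's 'for c in range(1, maxc+1): g = buckets.get(c,0); …' with the two breaks
def pvBLoop2 : List Int → PySem.Dict Int Int → Int → Int → Int
  | [], _, num, _ => num
  | c :: rest, b, num, m =>
      let g := b.getD c 0
      if g = 0 then pvBLoop2 rest b num m
      else if m < c then num
      else
        let k := min g (PySem.Int.floordiv m c)
        if k < g then num - k
        else pvBLoop2 rest b (num - k) (m - k * c)

def deleteProducts_alt (ids : List Int) (m : Int) : Int :=
  let freq := ids.foldl (fun d x => d.insert x (d.getD x 0 + 1)) PySem.Dict.empty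
  let buckets := freq.values.foldl (fun d c => d.insert c (d.getD c 0 + 1)) PySem.Dict.empty
  let maxc := match PySem.List.max? freq.values (fun v => v) with | some v => v | none => 0
  pvBLoop2 (PySem.List.pyRange 1 (maxc + 1) 1) buckets (freq.size : Int) m

-- ===== PRECONDITION & SPEC =====
def Spec_deleteProducts (ids : List Int) (m : Int) (out : Int) : Prop := out = deleteProducts_alt ids m
instance (ids : List Int) (m : Int) (out : Int) : Decidable (Spec_deleteProducts ids m out) := by unfold Spec_deleteProducts; infer_instance

-- ===== CLAIM (what is proved, stated in full; the proofs are below) =====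
def Claim_equal_deleteProducts : Prop := ∀ (ids : List Int) (m : Int), Dom_deleteProducts ids m → Spec_deleteProducts ids m (deleteProducts ids m)

-- ===== LEMMAS AND PROOFS =====

-- A's loop only reads the second components of its pairs: the same greedy loop over bare values.
def pvVLoop : List Int → Int → Int → Int
  | [], num, _ => num
  | c :: rest, num, m => if m < c then num else pvVLoop rest (num - 1) (m - c)

theorem pvALoop_eq_pvVLoop (l : List (Int × Int)) (num m : Int) :
    pvALoop l num m = pvVLoop (l.map (·.2)) num m := by
  induction l generalizing num m with
  | nil => rfl
  | cons item rest ih =>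
      simp only [pvALoop, pvVLoop, List.map_cons]
      by_cases h : m < item.2
      · rw [if_neg (by omega), if_pos h]
      · rw [if_pos (by omega), if_neg h, ih]

theorem map_snd_sorted (pairs : List (Int × Int)) :
    (PySem.List.sorted pairs (fun x => x.2) false).map (·.2)
      = PySem.List.sorted (pairs.map (·.2)) (fun v => v) false := by
  symm
  exact PySem.List.sorted_id_eq_of_perm_of_pairwise _ _
    ((PySem.List.sorted_perm pairs (fun x => x.2) false).map (·.2))
    (PySem.List.sorted_map_key_pairwise pairs (fun x => x.2))

-- floor division shifts by one when the dividend drops by the (positive) divisor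
theorem floordiv_sub_self (m c : Int) (hc : 0 < c) (_hm : c ≤ m) :
    PySem.Int.floordiv m c = PySem.Int.floordiv (m - c) c + 1 := by
  have h := (PySem.Int.floordiv_eq_iff_of_pos (a := m - c) (b := c)
    (q := PySem.Int.floordiv (m - c) c) hc).mp rfl
  rw [PySem.Int.floordiv_eq_iff_of_pos hc]
  constructor <;> nlinarith [h.1, h.2]

theorem floordiv_nonneg_of_le (m c : Int) (hc : 0 < c) (_hm : c ≤ m) :
    1 ≤ PySem.Int.floordiv m c := by
  rw [PySem.Int.le_floordiv_iff_mul_le hc]; omega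

-- the greedy loop consumes a constant block of n copies of c in one arithmetic step
theorem pvVLoop_replicate (c : Int) (hc : 1 ≤ c) (n : Nat) :
    ∀ (tail : List Int) (num m : Int),
    pvVLoop (List.replicate n c ++ tail) num m =
      if m < c then (if n = 0 then pvVLoop tail num m else num)
      else if (n : Int) ≤ PySem.Int.floordiv m c then pvVLoop tail (num - n) (m - n * c)
      else num - PySem.Int.floordiv m c := by
  induction n with
  | zero =>
      intro tail num m
      by_cases h : m < c
      · simp [h]
      · have h1 := floordiv_nonneg_of_le m c (by omega) (by omega)
        simp only [List.replicate_zero, List.nil_append]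
        rw [if_neg h, if_pos (by exact_mod_cast by omega)]
        norm_num
  | succ n ih =>
      intro tail num m
      rw [List.replicate_succ, List.cons_append]
      simp only [pvVLoop]
      by_cases h : m < c
      · simp [h]
      · rw [if_neg h, if_neg h, ih]
        have hd1 := floordiv_nonneg_of_le m c (by omega) (by omega)
        have hshift := floordiv_sub_self m c (by omega) (by omega)
        by_cases h2 : m - c < c
        · -- here floordiv m c = 1
          have hd0 : PySem.Int.floordiv m c = 1 := by
            rw [PySem.Int.floordiv_eq_iff_of_pos (by omega : (0:Int) < c)]
            constructor <;> nlinarith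
          rw [if_pos h2]
          by_cases hn : n = 0
          · subst hn
            rw [if_pos rfl, if_pos (by rw [hd0]; exact_mod_cast by omega)]
            norm_num
          · rw [if_neg hn, if_neg (by rw [hd0]; omega)]
            omega
        · rw [if_neg h2, hshift]
          by_cases h3 : (n : Int) ≤ PySem.Int.floordiv (m - c) c
          · rw [if_pos h3, if_pos (by push_cast; omega)]
            have e1 : num - 1 - (n : Int) = num - ((n : Nat) + 1 : Nat) := by push_cast; ring
            have e2 : m - c - (n : Int) * c = m - ((n : Nat) + 1 : Nat) * c := by push_cast; ring
            rw [e1, e2]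
          · rw [if_neg h3, if_neg (by push_cast; omega)]
            ring

-- counting-sort decomposition: count of a in a flatMap of replicate blocks over distinct keys
theorem count_flatMap_replicate (f : Int → Nat) (a : Int) :
    ∀ (cs : List Int), cs.Nodup →
      (cs.flatMap (fun c => List.replicate (f c) c)).count a
        = if a ∈ cs then f a else 0 := by
  intro cs
  induction cs with
  | nil => simp
  | cons c rest ih =>
      intro hnd
      rw [List.nodup_cons] at hnd
      simp only [List.flatMap_cons, List.count_append, ih hnd.2, List.count_replicate,
        List.mem_cons]
      by_cases h : a = c
      · subst h
        simp [hnd.1]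
      · have h' : ¬ (c = a) := fun hh => h hh.symm
        simp [h, h']

theorem pairwise_le_replicate (n : Nat) (c : Int) :
    (List.replicate n c).Pairwise (fun a b : Int => a ≤ b) := by
  induction n with
  | zero => simp
  | succ k ih =>
      rw [List.replicate_succ, List.pairwise_cons]
      exact ⟨fun y hy => le_of_eq (List.eq_of_mem_replicate hy).symm, ih⟩

theorem pairwise_flatMap_replicate (f : Int → Nat) :
    ∀ (cs : List Int), cs.Pairwise (· < ·) →
      (cs.flatMap (fun c => List.replicate (f c) c)).Pairwise (· ≤ ·) := by
  intro cs
  induction cs with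
  | nil => simp
  | cons c rest ih =>
      intro hp
      rw [List.pairwise_cons] at hp
      simp only [List.flatMap_cons]
      rw [List.pairwise_append]
      refine ⟨pairwise_le_replicate _ _, ih hp.2, ?_⟩
      intro x hx y hy
      rw [List.eq_of_mem_replicate hx]
      obtain ⟨c', hc', hy'⟩ := List.mem_flatMap.mp hy
      rw [List.eq_of_mem_replicate hy']
      exact le_of_lt (hp.1 c' hc')

-- the bucket loop of B, run over any nodup list of positive candidate counts,
-- computes the same as the greedy loop over the expanded multiset
theorem loop_eq (vals : List Int) :
    ∀ (cs : List Int), cs.Nodup → (∀ c ∈ cs, 1 ≤ c) →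
    ∀ (num m : Int),
      pvVLoop (cs.flatMap (fun c => List.replicate (vals.count c) c)) num m
        = pvBLoop2 cs (PySem.Dict.counter vals) num m := by
  intro cs
  induction cs with
  | nil => intro _ _ num m; rfl
  | cons c rest ih =>
      intro hnd hpos num m
      rw [List.nodup_cons] at hnd
      have hc : 1 ≤ c := hpos c (by simp)
      simp only [List.flatMap_cons, pvBLoop2, PySem.Dict.getD_counter]
      by_cases h0 : vals.count c = 0
      · rw [h0]
        simp only [List.replicate_zero, List.nil_append]
        rw [if_pos (by norm_num), ih hnd.2 (fun x hx => hpos x (List.mem_cons_of_mem _ hx))]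
      · rw [if_neg (by exact_mod_cast h0)]
        rw [pvVLoop_replicate c hc]
        by_cases h : m < c
        · rw [if_pos h, if_pos h, if_neg h0]
        · rw [if_neg h, if_neg h]
          by_cases h3 : ((vals.count c : Int)) ≤ PySem.Int.floordiv m c
          · rw [if_pos h3, if_neg (by omega), min_eq_left h3,
              ih hnd.2 (fun x hx => hpos x (List.mem_cons_of_mem _ hx))]
          · rw [if_neg h3, if_pos (by omega ), min_eq_right (by omega)]

-- every value of Counter(ids) is at least 1
theorem counter_values_pos (ids : List Int) :
    ∀ v ∈ (PySem.Dict.counter ids).values, 1 ≤ v := by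
  intro v hv
  simp only [PySem.Dict.values, PySem.Dict.items_counter, List.map_map, List.mem_map] at hv
  obtain ⟨k, hk, hkv⟩ := hv
  rw [PySem.Set.mem_ofList] at hk
  have : 0 < ids.count k := List.count_pos_iff.mpr hk
  simp only [Function.comp] at hkv
  omega

-- sorted(vals) is the concatenation of the frequency buckets for c = 1 .. maxc
theorem sorted_eq_buckets (vals : List Int) (mx : Int)
    (hpos : ∀ v ∈ vals, 1 ≤ v) (hmx : ∀ v ∈ vals, v ≤ mx) :
    PySem.List.sorted vals (fun v => v) false
      = (PySem.List.pyRange 1 (mx + 1) 1).flatMap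
          (fun c => List.replicate (vals.count c) c) := by
  apply PySem.List.sorted_id_eq_of_perm_of_pairwise
  · rw [List.perm_iff_count]
    intro a
    rw [count_flatMap_replicate _ _ _ (PySem.List.nodup_pyRange_one 1 (mx + 1))]
    by_cases h : a ∈ PySem.List.pyRange 1 (mx + 1) 1
    · rw [if_pos h]
    · rw [if_neg h]
      rw [PySem.List.mem_pyRange_one] at h
      by_cases ha : a ∈ vals
      · exact absurd ⟨hpos a ha, by have := hmx a ha; omega⟩ h
      · simp [List.count_eq_zero_of_not_mem ha]
  · exact pairwise_flatMap_replicate _ _ (PySem.List.pairwise_lt_pyRange_one 1 (mx + 1))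

-- ===== VERDICT (by name: the statement is the Claim_ definition above) =====
theorem deleteProducts_spec : Claim_equal_deleteProducts := by
  intro ids m _
  show deleteProducts ids m = deleteProducts_alt ids m
  have hB : deleteProducts_alt ids m
      = pvBLoop2
          (PySem.List.pyRange 1
            ((match PySem.List.max? (PySem.Dict.counter ids).values (fun v => v) with
              | some v => v | none => 0) + 1) 1)
          (PySem.Dict.counter (PySem.Dict.counter ids).values)
          ((PySem.Dict.counter ids).size : Int) m := by
    unfold deleteProducts_alt
    simp only [PySem.Dict.foldl_insert_getD_add_one_eq_counter]
  rw [hB]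
  set vals := (PySem.Dict.counter ids).values with hvals_def
  set mxv : Int := (match PySem.List.max? vals (fun v => v) with
      | some v => v | none => 0) with hmx_def
  have hpos : ∀ v ∈ vals, 1 ≤ v := counter_values_pos ids
  have hmx : ∀ v ∈ vals, v ≤ mxv := by
    intro v hv
    rw [hmx_def]
    cases hmax : PySem.List.max? vals (fun v => v) with
    | none =>
        rw [(PySem.List.max?_eq_none_iff _ _).mp hmax] at hv
        cases hv
    | some mx => exact PySem.List.max?_isMax hmax v hv
  have hvals : vals
      = ((PySem.Set.ofList ids).map (fun i => (i, (ids.count i : Int)))).map (·.2) := by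
    simp [hvals_def, PySem.Dict.values, PySem.Dict.items_counter, List.map_map]
  have hsize : ((PySem.Dict.counter ids).size : Int)
      = (((PySem.List.sorted ((PySem.Set.ofList ids).map (fun i => (i, (ids.count i : Int))))
            (fun x => x.2) false)).length : Int) := by
    simp [PySem.Dict.size, PySem.Dict.items_counter, PySem.List.length_sorted]
  unfold deleteProducts
  rw [pvALoop_eq_pvVLoop, map_snd_sorted, ← hvals, ← hsize,
    sorted_eq_buckets vals mxv hpos hmx,
    loop_eq vals _ (PySem.List.nodup_pyRange_one 1 (mxv + 1))
      (fun c hc => ((PySem.List.mem_pyRange_one).mp hc).1)]
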